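-- pv_equiv track=rewrite | github.com/kseniia-pug/BNNtoSAT | src/encodeModel/encode_constraint.py | encode_geq
-- ===== SOURCE A (Python) =====
-- from typing import List
--
-- def encode_geq(
--         x: List[int],
--         a: List[bool],
-- ) -> List[List[int]]:
--     assert len(x) == len(a)
--
--     if len(x) == 0:
--         return []
--
--     clauses = []
--     assert isinstance(a[0], bool)
--     if a[0]:
--         clauses.append([x[0]])
--         clauses.extend(encode_geq(x[1:], a[1:]))
--     else:
--         # Append (x=1) to all sub-clauses:
--         for clause in encode_geq(x[1:], a[1:]):
--             clauses.append([x[0]] + clause)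
--     return clauses
-- ===== SOURCE B (Python) =====
-- from typing import List
--
-- def encode_geq(
--         x: List[int],
--         a: List[bool],
-- ) -> List[List[int]]:
--     assert len(x) == len(a)
--     clauses = []
--     prefix = []  # literals at false positions seen so far
--     for xi, ai in zip(x, a):
--         assert isinstance(ai, bool)
--         if ai:
--             clauses.append(prefix + [xi])
--         else:
--             prefix.append(xi)
--     return clauses
-- ===== Notes on version B (the rewrite author's own statement) =====
-- stated objective: faster
-- what changed: replaces the recursive build (which re-prefixes x[0] onto every sub-clause at each level, copying clause lists repeatedly) with a single iterative pass that keeps the running prefix of false-position literals and emits one clause per true index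
import Mathlib
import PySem

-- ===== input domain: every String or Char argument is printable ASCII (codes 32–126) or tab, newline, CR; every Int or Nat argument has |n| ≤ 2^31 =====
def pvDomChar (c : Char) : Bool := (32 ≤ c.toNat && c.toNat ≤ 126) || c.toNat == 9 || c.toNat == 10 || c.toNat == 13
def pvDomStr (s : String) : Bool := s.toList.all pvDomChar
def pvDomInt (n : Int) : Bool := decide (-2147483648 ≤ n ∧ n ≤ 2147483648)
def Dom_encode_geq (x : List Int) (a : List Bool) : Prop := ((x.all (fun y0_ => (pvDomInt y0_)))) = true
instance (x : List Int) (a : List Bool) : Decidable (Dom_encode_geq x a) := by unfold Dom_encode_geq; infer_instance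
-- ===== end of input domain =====

-- ===== PORT A =====
-- B replaces A's recursion (re-prefixing x[0] onto every sub-clause) by one pass keeping the prefix of false-position literals (faster in a timing run).
-- Port of A: structural recursion mirroring the Python recursion on slices x[1:], a[1:].
def encode_geq (x : List Int) (a : List Bool) : List (List Int) :=
  match x, a with
  | [], _ => []
  | x0 :: xs, a0 :: as_ =>
    if a0 then [x0] :: encode_geq xs as_
    else (encode_geq xs as_).map (fun c => [x0] ++ c)
  | _ :: _, [] => []  -- unreachable under Pre_ (the Python assert raises here)

-- ===== PORT B =====
def encode_geq_alt (x : List Int) (a : List Bool) : List (List Int) :=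
  ((x.zip a).foldl
    (fun (st : List (List Int) × List Int) p =>
      if p.2 then (st.1 ++ [st.2 ++ [p.1]], st.2) else (st.1, st.2 ++ [p.1]))
    ([], [])).1

-- ===== PRECONDITION & SPEC =====
-- Pre_: the Python assert requires equal lengths; A raises AssertionError otherwise.
def Pre_encode_geq (x : List Int) (a : List Bool) : Prop := x.length = a.length
instance (x : List Int) (a : List Bool) : Decidable (Pre_encode_geq x a) := by unfold Pre_encode_geq; infer_instance
def pvWitness_encode_geq : List Int × List Bool := ([1, -2, 3], [true, false, true])
def Spec_encode_geq (x : List Int) (a : List Bool) (out : List (List Int)) : Prop := out = encode_geq_alt x a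
instance (x : List Int) (a : List Bool) (out : List (List Int)) : Decidable (Spec_encode_geq x a out) := by unfold Spec_encode_geq; infer_instance

-- ===== CLAIM (what is proved, stated in full; the proofs are below) =====
def Claim_equal_encode_geq : Prop := ∀ (x : List Int) (a : List Bool), Dom_encode_geq x a → Pre_encode_geq x a → Spec_encode_geq x a (encode_geq x a)

-- ===== LEMMAS AND PROOFS =====
-- Loop invariant for B's fold: it appends, to the accumulated clauses, A's result with the running prefix prepended to each clause.
theorem encode_geq_loop (xs : List Int) (as_ : List Bool) (cls : List (List Int)) (pre : List Int) :
    ((xs.zip as_).foldl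
      (fun (st : List (List Int) × List Int) p =>
        if p.2 then (st.1 ++ [st.2 ++ [p.1]], st.2) else (st.1, st.2 ++ [p.1]))
      (cls, pre))
    = (cls ++ (encode_geq xs as_).map (fun c => pre ++ c),
       pre ++ (xs.zip as_).filterMap (fun p => if p.2 then none else some p.1)) := by
  induction xs generalizing as_ cls pre with
  | nil => simp [encode_geq]
  | cons x0 xs ih =>
    cases as_ with
    | nil => simp [encode_geq]
    | cons a0 as_ =>
      cases a0 <;> simp [encode_geq, ih, List.map_map, Function.comp, List.append_assoc]

-- ===== VERDICT (by name: the statement is the Claim_ definition above) =====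
theorem encode_geq_spec : Claim_equal_encode_geq := by
  intro x a _ _
  unfold Spec_encode_geq encode_geq_alt
  rw [encode_geq_loop]
  simp
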